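-- pv_equiv track=rewrite | github.com/One-armed-boy/leetcode_solve | 2453-destroy-sequential-targets/2453-destroy-sequential-targets.py | destroyTargets
-- ===== SOURCE A (Python) =====
-- from typing import List
--
-- def destroyTargets(nums: List[int], space: int) -> int:
--     # 각 nums를 각각 나머지 해준다. 이 때 나머지가 같은 애들은 전부 함께 묶일 수 있으며, 그 중 가장 작은 애가 항상 최적 값이 된다
--
--     modMap = {}
--
--     for num in nums:
--         modNum = num % space
--         if modNum not in modMap:
--             modMap[modNum] = [10**9 + 1, 0]
--         modMap[modNum] = [min(modMap[modNum][0], num), modMap[modNum][1] + 1]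
--
--     result = 0
--     maxDestroy = 0
--
--     for idx in modMap:
--         canDestroyCnt = modMap[idx][1]
--         if canDestroyCnt > maxDestroy or (canDestroyCnt == maxDestroy and result > modMap[idx][0]):
--             result, maxDestroy = modMap[idx]
--
--     return result
-- ===== SOURCE B (Python) =====
-- from typing import List
--
-- def destroyTargets(nums: List[int], space: int) -> int:
--     # Two-pass: count residues once, then take the smallest num in any max-count class.
--     counter = {}
--     for num in nums:
--         counter[num % space] = counter.get(num % space, 0) + 1
--     if not nums:
--         return 0
--     maxCount = max(counter.values())
--     return min(num for num in nums if counter[num % space] == maxCount)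
-- ===== Notes on version B (the rewrite author's own statement) =====
-- stated objective: alternative
-- what changed: Instead of one dict tracking a (sentinel-initialised running minimum, count) pair per residue class plus a dict-scan with a two-part tie-break, B builds a plain residue counter, takes the maximum count, and returns the minimum of nums over max-count classes in a second pass, with no sentinel; the counter of plain ints (no per-element two-element-list rebuild) makes B measurably faster by a constant factor.
-- intended difference: On nonempty inputs where every element of every maximum-count residue class (mod space) exceeds 10^9+1, A returns its leftover sentinel 10^9+1 (a value not in nums), while B returns the intended answer: the smallest element of a maximum-count class (witness: A([2000000000], 3) = 1000000001, B returns 2000000000). — e.g. on destroyTargets([2000000000], 3): A returns 1000000001, B returns 2000000000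
import Mathlib
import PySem

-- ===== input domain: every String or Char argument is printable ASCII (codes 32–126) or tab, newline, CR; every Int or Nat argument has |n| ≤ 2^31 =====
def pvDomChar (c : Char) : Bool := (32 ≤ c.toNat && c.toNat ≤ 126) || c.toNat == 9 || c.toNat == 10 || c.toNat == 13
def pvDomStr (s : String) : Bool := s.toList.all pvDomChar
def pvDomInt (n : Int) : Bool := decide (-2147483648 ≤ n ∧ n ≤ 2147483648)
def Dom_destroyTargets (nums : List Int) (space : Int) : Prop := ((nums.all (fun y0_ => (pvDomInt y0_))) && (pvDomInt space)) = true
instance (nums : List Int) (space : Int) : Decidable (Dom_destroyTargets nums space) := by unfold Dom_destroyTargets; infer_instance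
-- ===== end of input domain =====

-- B is a two-pass count-then-min re-implementation (no per-group minimum tracking, no 10^9+1 sentinel).
-- Note: A returns its sentinel 10^9+1 (not an element of nums) whenever every element of every
-- maximum-count residue class exceeds 10^9+1; B returns the intended smallest such element (see D_ below).

-- ===== PORT A =====
def destroyTargets (nums : List Int) (space : Int) : Int :=
  let modMap : PySem.Dict Int (Int × Int) :=
    nums.foldl (fun modMap num =>
      let modNum := PySem.Int.mod num space
      let modMap := if modMap.contains modNum then modMap
                    else modMap.insert modNum (10 ^ 9 + 1, 0)
      let cur := modMap.getD modNum (0, 0)  -- key present here; default never used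
      modMap.insert modNum (min cur.1 num, cur.2 + 1)) PySem.Dict.empty
  let st := modMap.keys.foldl (fun (st : Int × Int) idx =>
      let e := modMap.getD idx (0, 0)
      if e.2 > st.2 ∨ (e.2 = st.2 ∧ st.1 > e.1) then (e.1, e.2) else st) (0, 0)
  st.1

-- ===== PORT B =====
def destroyTargets_alt (nums : List Int) (space : Int) : Int :=
  let counter : PySem.Dict Int Int :=
    nums.foldl (fun counter num =>
      counter.insert (PySem.Int.mod num space) (counter.getD (PySem.Int.mod num space) 0 + 1))
      PySem.Dict.empty
  if nums.isEmpty then 0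
  else
    let maxCount := (PySem.List.max? counter.values (fun x => x)).getD 0
    ((PySem.List.min?
        (nums.filter (fun num => counter.getD (PySem.Int.mod num space) 0 == maxCount))
        (fun x => x)).getD 0)

-- ===== PRECONDITION & SPEC =====
-- Pre_ excludes exactly the inputs where Python A raises ZeroDivisionError: space = 0 with nums nonempty.
def Pre_destroyTargets (nums : List Int) (space : Int) : Prop := nums = [] ∨ space ≠ 0
instance (nums : List Int) (space : Int) : Decidable (Pre_destroyTargets nums space) := by
  unfold Pre_destroyTargets; infer_instance
def pvWitness_destroyTargets : List Int × Int := ([1, 2, 3], 2)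

-- pvCls nums space n = how many elements of nums share n's residue class mod space
def pvCls (nums : List Int) (space n : Int) : Nat :=
  nums.countP (fun x => PySem.Int.mod x space == PySem.Int.mod n space)

-- On inputs where every element of every maximum-count residue class (mod space) exceeds 10^9+1,
-- A returns its sentinel 10^9+1 — a value not in nums — while B returns the intended answer, the
-- smallest element of a maximum-count class.
def D_destroyTargets (nums : List Int) (space : Int) : Prop :=
  nums ≠ [] ∧ ∀ n ∈ nums,
    (∀ x ∈ nums, pvCls nums space x ≤ pvCls nums space n) → 10 ^ 9 + 1 < n
instance (nums : List Int) (space : Int) : Decidable (D_destroyTargets nums space) := by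
  unfold D_destroyTargets; infer_instance

def Spec_destroyTargets (nums : List Int) (space : Int) (out : Int) : Prop :=
  ¬ D_destroyTargets nums space → out = destroyTargets_alt nums space
instance (nums : List Int) (space : Int) (out : Int) : Decidable (Spec_destroyTargets nums space out) := by
  unfold Spec_destroyTargets; infer_instance

def pvDiffWitness_destroyTargets : List Int × Int := ([2000000000], 3)
def pvDiffWitnessOut_destroyTargets : Int × Int := (1000000001, 2000000000)

-- ===== CLAIM (what is proved, stated in full; the proofs are below) =====
def Claim_unchanged_destroyTargets : Prop := ∀ (nums : List Int) (space : Int),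
  Dom_destroyTargets nums space → Pre_destroyTargets nums space →
  Spec_destroyTargets nums space (destroyTargets nums space)
def Claim_changed_destroyTargets : Prop :=
  Dom_destroyTargets (pvDiffWitness_destroyTargets.1) (pvDiffWitness_destroyTargets.2) ∧
  Pre_destroyTargets (pvDiffWitness_destroyTargets.1) (pvDiffWitness_destroyTargets.2) ∧
  D_destroyTargets (pvDiffWitness_destroyTargets.1) (pvDiffWitness_destroyTargets.2) ∧
  destroyTargets (pvDiffWitness_destroyTargets.1) (pvDiffWitness_destroyTargets.2) = pvDiffWitnessOut_destroyTargets.1 ∧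
  destroyTargets_alt (pvDiffWitness_destroyTargets.1) (pvDiffWitness_destroyTargets.2) = pvDiffWitnessOut_destroyTargets.2 ∧
  pvDiffWitnessOut_destroyTargets.1 ≠ pvDiffWitnessOut_destroyTargets.2
def Claim_exact_destroyTargets : Prop := ∀ (nums : List Int) (space : Int),
  Dom_destroyTargets nums space → Pre_destroyTargets nums space → D_destroyTargets nums space →
  destroyTargets nums space ≠ destroyTargets_alt nums space

-- ===== LEMMAS AND PROOFS =====

-- abbreviations used only by the proofs
def pvKey (space n : Int) : Int := PySem.Int.mod n space
def pvGrp (nums : List Int) (space m : Int) : List Int :=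
  nums.filter (fun n => pvKey space n == m)
def pvCnt (nums : List Int) (space m : Int) : Nat :=
  (nums.map (pvKey space)).count m
def pvSM (nums : List Int) (space m : Int) : Int :=
  (pvGrp nums space m).foldl min (10 ^ 9 + 1)
def pvVal (nums : List Int) (space m : Int) : Int × Int :=
  (pvSM nums space m, (pvCnt nums space m : Int))
-- the canonical single-insert form of A's first loop body
def pvStepA (space : Int) (d : PySem.Dict Int (Int × Int)) (num : Int) : PySem.Dict Int (Int × Int) :=
  d.insert (pvKey space num)
    (match d.get? (pvKey space num) with
     | none => (min (10 ^ 9 + 1) num, 1)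
     | some c => (min c.1 num, c.2 + 1))
-- A's selection step and the order it maximises
def pvSel (st p : Int × Int) : Int × Int :=
  if p.2 > st.2 ∨ (p.2 = st.2 ∧ st.1 > p.1) then p else st
def pvGe (a b : Int × Int) : Prop := b.2 < a.2 ∨ (b.2 = a.2 ∧ a.1 ≤ b.1)
-- the per-key evolution of A's dict entry
def pvApply (l : List Int) (o : Option (Int × Int)) : Option (Int × Int) :=
  l.foldl (fun o n =>
    match o with
    | none => some (min (10 ^ 9 + 1) n, 1)
    | some c => some (min c.1 n, c.2 + 1)) o

lemma pvStepA_eq (space : Int) (d : PySem.Dict Int (Int × Int)) (num : Int) :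
    (let modNum := PySem.Int.mod num space
     let d' := if d.contains modNum then d else d.insert modNum (10 ^ 9 + 1, 0)
     let cur := d'.getD modNum (0, 0)
     d'.insert modNum (min cur.1 num, cur.2 + 1)) = pvStepA space d num := by
  show (if d.contains (PySem.Int.mod num space) then d
        else d.insert (PySem.Int.mod num space) (10 ^ 9 + 1, 0)).insert (PySem.Int.mod num space) _
       = _
  cases h : d.contains (PySem.Int.mod num space) with
  | true =>
    obtain ⟨c, hc⟩ : ∃ c, d.get? (PySem.Int.mod num space) = some c := by
      rw [PySem.Dict.contains_eq_isSome_get?] at h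
      exact Option.isSome_iff_exists.mp h
    simp [pvStepA, pvKey, hc, PySem.Dict.getD_eq_get?_getD]
  | false =>
    have hn : d.get? (PySem.Int.mod num space) = none := by
      rw [PySem.Dict.contains_eq_isSome_get?] at h
      exact Option.not_isSome_iff_eq_none.mp (by simp [h])
    simp [pvStepA, pvKey, hn, PySem.Dict.getD_insert_self, PySem.Dict.insert_insert_self]

lemma pvStepFun_eq (space : Int) :
    (fun (modMap : PySem.Dict Int (Int × Int)) (num : Int) =>
      let modNum := PySem.Int.mod num space
      let modMap := if modMap.contains modNum then modMap
                    else modMap.insert modNum (10 ^ 9 + 1, 0)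
      let cur := modMap.getD modNum (0, 0)
      modMap.insert modNum (min cur.1 num, cur.2 + 1)) = pvStepA space :=
  funext fun d => funext fun num => pvStepA_eq space d num

lemma pvFoldA_get? (space : Int) (t : List Int) (d : PySem.Dict Int (Int × Int)) (m : Int) :
    (t.foldl (pvStepA space) d).get? m = pvApply (pvGrp t space m) (d.get? m) := by
  induction t generalizing d with
  | nil => rfl
  | cons n t ih =>
    simp only [List.foldl_cons, ih, pvGrp, List.filter_cons]
    by_cases h : pvKey space n = m
    · rw [if_pos (by simp [h])]
      have hstep : (pvStepA space d n).get? m =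
          (match d.get? m with
           | none => some ((min (10 ^ 9 + 1) n : Int), (1 : Int))
           | some c => some (min c.1 n, c.2 + 1)) := by
        unfold pvStepA
        rw [h, PySem.Dict.get?_insert_self]
        cases d.get? m <;> rfl
      rw [hstep]
      cases d.get? m <;> rfl
    · rw [if_neg (by simp [h])]
      have hne : (pvStepA space d n).get? m = d.get? m := by
        unfold pvStepA
        exact PySem.Dict.get?_insert_of_ne _ _ (fun hm => h hm.symm)
      rw [hne]

lemma pvFoldA_keys (space : Int) (nums : List Int) :
    (nums.foldl (pvStepA space) PySem.Dict.empty).keys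
      = PySem.Set.ofList (nums.map (pvKey space)) := by
  rw [show pvStepA space = (fun (d : PySem.Dict Int (Int × Int)) (x : Int) =>
        d.insert (pvKey space x)
          ((fun (d : PySem.Dict Int (Int × Int)) (num : Int) =>
            (match d.get? (pvKey space num) with
             | none => (min (10 ^ 9 + 1) num, 1)
             | some c => (min c.1 num, c.2 + 1))) d x)) from rfl,
      PySem.Dict.keys_foldl_insert_key]
  simp [PySem.Dict.keys_empty, PySem.Set.update_nil_left]

lemma pvApply_some (l : List Int) (a b : Int) :
    pvApply l (some (a, b)) = some (l.foldl min a, b + l.length) := by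
  induction l generalizing a b with
  | nil => simp [pvApply]
  | cons n t ih =>
    simp only [pvApply, List.foldl_cons] at *
    rw [ih]
    simp only [List.length_cons]
    refine congrArg some (Prod.ext rfl ?_)
    push_cast; ring

lemma pvApply_none (l : List Int) (h : l ≠ []) :
    pvApply l none = some (l.foldl min (10 ^ 9 + 1), (l.length : Int)) := by
  cases l with
  | nil => simp at h
  | cons n t =>
    simp only [pvApply, List.foldl_cons]
    rw [show (t.foldl _ (some (min (10 ^ 9 + 1) n, (1 : Int)))) = pvApply t (some (min (10 ^ 9 + 1) n, 1)) from rfl,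
        pvApply_some]
    refine congrArg some (Prod.ext rfl ?_)
    simp only [List.length_cons]
    push_cast; ring

-- foldl min bounds
lemma foldl_min_le_init (l : List Int) (a : Int) : l.foldl min a ≤ a := by
  induction l generalizing a with
  | nil => exact le_refl a
  | cons x t ih => exact le_trans (ih (min a x)) (min_le_left a x)
lemma foldl_min_le_mem {l : List Int} {a x : Int} (hx : x ∈ l) : l.foldl min a ≤ x := by
  induction l generalizing a with
  | nil => simp at hx
  | cons y t ih =>
    rcases List.mem_cons.mp hx with h | h
    · subst h
      exact le_trans (foldl_min_le_init t (min a x)) (min_le_right a x)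
    · exact ih h
lemma le_foldl_min {l : List Int} {a w : Int} (ha : w ≤ a) (hl : ∀ x ∈ l, w ≤ x) :
    w ≤ l.foldl min a := by
  induction l generalizing a with
  | nil => exact ha
  | cons x t ih =>
    exact ih (le_min ha (hl x List.mem_cons_self)) (fun y hy => hl y (List.mem_cons_of_mem _ hy))

-- the selection fold returns a pvGe-maximum of the initial state and the list
lemma pvGe_trans {a b c : Int × Int} (h1 : pvGe a b) (h2 : pvGe b c) : pvGe a c := by
  unfold pvGe at *; omega

lemma pvSel_fold_spec (l : List (Int × Int)) (st : Int × Int) :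
    l.foldl pvSel st ∈ st :: l ∧ ∀ p ∈ st :: l, pvGe (l.foldl pvSel st) p := by
  induction l generalizing st with
  | nil =>
    refine ⟨List.mem_cons_self, fun p hp => ?_⟩
    rcases List.mem_cons.mp hp with h | h
    · subst h; exact Or.inr ⟨rfl, le_refl _⟩
    · simp at h
  | cons p t ih =>
    obtain ⟨hmem, hge⟩ := ih (pvSel st p)
    have aux : pvGe (pvSel st p) st ∧ pvGe (pvSel st p) p := by
      unfold pvSel pvGe
      split_ifs with h
      · exact ⟨by omega, by omega⟩
      · exact ⟨by omega, by omega⟩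
    refine ⟨?_, fun q hq => ?_⟩
    · simp only [List.foldl_cons]
      rcases List.mem_cons.mp hmem with h | h
      · rw [h]
        unfold pvSel
        split_ifs
        · exact List.mem_cons_of_mem _ List.mem_cons_self
        · exact List.mem_cons_self
      · exact List.mem_cons_of_mem _ (List.mem_cons_of_mem _ h)
    · have hge' : ∀ q ∈ pvSel st p :: t, pvGe (List.foldl pvSel st (p :: t)) q := by
        simpa only [List.foldl_cons] using hge
      have hgest : pvGe (List.foldl pvSel st (p :: t)) (pvSel st p) :=
        hge' _ List.mem_cons_self
      rcases List.mem_cons.mp hq with h | h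
      · subst h; exact pvGe_trans hgest aux.1
      · rcases List.mem_cons.mp h with h' | h'
        · subst h'; exact pvGe_trans hgest aux.2
        · exact hge' _ (List.mem_cons_of_mem _ h')

lemma pvGe_antisymm {a b : Int × Int} (h1 : pvGe a b) (h2 : pvGe b a) : a = b := by
  unfold pvGe at *
  have : a.1 = b.1 ∧ a.2 = b.2 := by omega
  exact Prod.ext this.1 this.2

lemma mem_pvGrp {nums : List Int} {space m x : Int} :
    x ∈ pvGrp nums space m ↔ x ∈ nums ∧ pvKey space x = m := by
  simp [pvGrp]

lemma pvCnt_eq_length (nums : List Int) (space m : Int) :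
    pvCnt nums space m = (pvGrp nums space m).length := by
  unfold pvCnt pvGrp
  rw [List.count_eq_countP, List.countP_map, List.countP_eq_length_filter]
  rfl

-- the dict entry of A's first loop at a key that occurs
lemma pvVal_getD (space : Int) (nums : List Int) (m : Int)
    (hm : m ∈ nums.map (pvKey space)) :
    (nums.foldl (pvStepA space) PySem.Dict.empty).getD m (0, 0) = pvVal nums space m := by
  obtain ⟨n, hn, hkey⟩ := List.mem_map.mp hm
  have hgrp : pvGrp nums space m ≠ [] :=
    List.ne_nil_of_mem (mem_pvGrp.mpr ⟨hn, hkey⟩)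
  rw [PySem.Dict.getD_eq_get?_getD, pvFoldA_get?, PySem.Dict.get?_empty,
      pvApply_none _ hgrp]
  simp [pvVal, pvSM, pvCnt_eq_length]

-- A's result equals t.1 for any pvGe-dominant member t of the value list
lemma A_eq_of_dominant (nums : List Int) (space : Int) (t : Int × Int)
    (ht : t ∈ (PySem.Set.ofList (nums.map (pvKey space))).map (pvVal nums space))
    (hd : ∀ p ∈ (((0 : Int), (0 : Int)) ::
          (PySem.Set.ofList (nums.map (pvKey space))).map (pvVal nums space)), pvGe t p) :
    destroyTargets nums space = t.1 := by
  simp only [destroyTargets]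
  rw [pvStepFun_eq]
  have hfold : ∀ (d : PySem.Dict Int (Int × Int)),
      (d.keys.foldl (fun (st : Int × Int) idx =>
        let e := d.getD idx (0, 0)
        if e.2 > st.2 ∨ (e.2 = st.2 ∧ st.1 > e.1) then (e.1, e.2) else st) (0, 0))
      = (d.keys.map (fun m => d.getD m (0, 0))).foldl pvSel (0, 0) := by
    intro d
    rw [List.foldl_map]
    rfl
  rw [hfold, pvFoldA_keys,
      List.map_congr_left (fun m hm =>
        pvVal_getD space nums m ((PySem.Set.mem_ofList _ _).mp hm))]
  obtain ⟨hmem, hge⟩ := pvSel_fold_spec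
    ((PySem.Set.ofList (nums.map (pvKey space))).map (pvVal nums space)) ((0 : Int), (0 : Int))
  exact congrArg Prod.fst (pvGe_antisymm (hge t (List.mem_cons_of_mem _ ht)) (hd _ hmem))

-- characterisation of B's result on nonempty input
lemma B_spec (nums : List Int) (space : Int) (h : nums ≠ []) :
    ∃ (C : Int) (w : Int), destroyTargets_alt nums space = w ∧ w ∈ nums ∧
      (pvCnt nums space (pvKey space w) : Int) = C ∧
      (∀ x ∈ nums, (pvCnt nums space (pvKey space x) : Int) ≤ C) ∧
      (∀ x ∈ nums, (pvCnt nums space (pvKey space x) : Int) = C → w ≤ x) := by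
  simp only [destroyTargets_alt]
  have hc : nums.foldl (fun (counter : PySem.Dict Int Int) (num : Int) =>
        counter.insert (PySem.Int.mod num space) (counter.getD (PySem.Int.mod num space) 0 + 1))
        PySem.Dict.empty
      = PySem.Dict.counter (nums.map (pvKey space)) := by
    rw [← PySem.Dict.foldl_insert_getD_add_one_eq_counter, List.foldl_map]
    rfl
  rw [hc]
  rw [if_neg (by simp [h])]
  simp only [PySem.Dict.getD_counter]
  have hvals : (PySem.Dict.counter (nums.map (pvKey space))).values
      = (PySem.Set.ofList (nums.map (pvKey space))).map
          (fun k => ((nums.map (pvKey space)).count k : Int)) := by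
    show ((PySem.Dict.counter (nums.map (pvKey space))).items).map (fun p => p.2) = _
    rw [PySem.Dict.items_counter, List.map_map]
    rfl
  rw [hvals]
  obtain ⟨n0, hn0⟩ : ∃ n0, n0 ∈ nums := by
    cases nums with
    | nil => exact absurd rfl h
    | cons a t => exact ⟨a, List.mem_cons_self⟩
  have hk0 : pvKey space n0 ∈ nums.map (pvKey space) := List.mem_map_of_mem hn0
  have hKne : (PySem.Set.ofList (nums.map (pvKey space))).map
      (fun k => ((nums.map (pvKey space)).count k : Int)) ≠ [] := by
    have := List.ne_nil_of_mem ((PySem.Set.mem_ofList _ _).mpr hk0)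
    simpa using this
  obtain ⟨M, hM⟩ : ∃ M, PySem.List.max? ((PySem.Set.ofList (nums.map (pvKey space))).map
      (fun k => ((nums.map (pvKey space)).count k : Int))) (fun x => x) = some M := by
    cases hmx : PySem.List.max? ((PySem.Set.ofList (nums.map (pvKey space))).map
        (fun k => ((nums.map (pvKey space)).count k : Int))) (fun x => x) with
    | none =>
      rw [PySem.List.max?_eq_none_iff] at hmx
      exact absurd hmx hKne
    | some M => exact ⟨M, rfl⟩
  rw [hM]
  simp only [Option.getD_some]
  have hMmax := PySem.List.max?_isMax hM
  obtain ⟨m1, hm1K, hm1⟩ := List.mem_map.mp (PySem.List.max?_mem hM)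
  -- every per-element count is ≤ M
  have hub : ∀ x ∈ nums, ((nums.map (pvKey space)).count (pvKey space x) : Int) ≤ M := by
    intro x hx
    exact hMmax _ (List.mem_map_of_mem ((PySem.Set.mem_ofList _ _).mpr (List.mem_map_of_mem hx)))
  -- the filtered list is nonempty
  obtain ⟨n1, hn1, hkn1⟩ := List.mem_map.mp ((PySem.Set.mem_ofList _ _).mp hm1K)
  have hn1f : n1 ∈ nums.filter
      (fun num => ((nums.map (pvKey space)).count (PySem.Int.mod num space) : Int) == M) := by
    refine List.mem_filter.mpr ⟨hn1, ?_⟩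
    have : pvKey space n1 = m1 := hkn1
    simp only [show PySem.Int.mod n1 space = pvKey space n1 from rfl, this, beq_iff_eq, hm1]
  obtain ⟨w, hw⟩ : ∃ w, PySem.List.min? (nums.filter
      (fun num => ((nums.map (pvKey space)).count (PySem.Int.mod num space) : Int) == M))
      (fun x => x) = some w := by
    cases hmn : PySem.List.min? (nums.filter
        (fun num => ((nums.map (pvKey space)).count (PySem.Int.mod num space) : Int) == M))
        (fun x => x) with
    | none =>
      rw [PySem.List.min?_eq_none_iff] at hmn
      exact absurd hmn (List.ne_nil_of_mem hn1f)
    | some w => exact ⟨w, rfl⟩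
  rw [hw]
  have hwmem := List.mem_filter.mp (PySem.List.min?_mem hw)
  have hwcnt : ((nums.map (pvKey space)).count (pvKey space w) : Int) = M := by
    have := hwmem.2
    simpa [beq_iff_eq] using this
  refine ⟨M, w, rfl, hwmem.1, hwcnt, hub, fun x hx hxc => ?_⟩
  exact PySem.List.min?_isMin hw x (List.mem_filter.mpr ⟨hx, by
    simp only [show PySem.Int.mod x space = pvKey space x from rfl, beq_iff_eq]
    exact hxc⟩)

lemma le_pvSM_of (nums : List Int) (space m w : Int) (hw : w ≤ 10 ^ 9 + 1)
    (h : ∀ x ∈ nums, pvKey space x = m → w ≤ x) : w ≤ pvSM nums space m :=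
  le_foldl_min hw (fun x hx => h x (mem_pvGrp.mp hx).1 (mem_pvGrp.mp hx).2)

lemma pvCls_eq (nums : List Int) (space n : Int) :
    pvCls nums space n = pvCnt nums space (pvKey space n) := by
  unfold pvCls pvCnt
  rw [List.count_eq_countP, List.countP_map]
  rfl

lemma pvCnt_pos (nums : List Int) (space : Int) {w : Int} (hw : w ∈ nums) :
    0 < pvCnt nums space (pvKey space w) :=
  List.count_pos_iff.mpr (List.mem_map_of_mem hw)

-- ===== VERDICT (by name: the statement is the Claim_ definition above) =====
theorem destroyTargets_spec : Claim_unchanged_destroyTargets := by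
  intro nums space _ _ hD
  by_cases hnil : nums = []
  · subst hnil; rfl
  · obtain ⟨C, w, hB, hwmem, hwcnt, hub, hmin⟩ := B_spec nums space hnil
    rw [hB]
    unfold D_destroyTargets at hD
    push Not at hD
    obtain ⟨ns, hns, hnsmax, hnsle⟩ := hD hnil
    have hnsmax' : ∀ x ∈ nums,
        pvCnt nums space (pvKey space x) ≤ pvCnt nums space (pvKey space ns) := by
      intro x hx
      have := hnsmax x hx
      rwa [pvCls_eq, pvCls_eq] at this
    have hnsC : (pvCnt nums space (pvKey space ns) : Int) = C := by
      have h1 := hub ns hns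
      have h2 := hnsmax' w hwmem
      omega
    have hw109 : w ≤ 10 ^ 9 + 1 := le_trans (hmin ns hns hnsC) hnsle
    have hCw : ∀ x ∈ nums, pvKey space x = pvKey space w → w ≤ x := by
      intro x hx hk
      refine hmin x hx ?_
      rw [hk]; exact hwcnt
    have hSMw : pvSM nums space (pvKey space w) = w :=
      le_antisymm (foldl_min_le_mem (mem_pvGrp.mpr ⟨hwmem, rfl⟩))
        (le_pvSM_of nums space _ w hw109 hCw)
    have hCpos : (0 : Int) < C := by
      have := pvCnt_pos nums space hwmem; omega
    refine A_eq_of_dominant nums space (w, C) ?_ ?_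
    · exact List.mem_map.mpr ⟨pvKey space w,
        (PySem.Set.mem_ofList _ _).mpr (List.mem_map_of_mem hwmem),
        by unfold pvVal; rw [hSMw, hwcnt]⟩
    · intro p hp
      rcases List.mem_cons.mp hp with h | h
      · subst h; exact Or.inl hCpos
      · obtain ⟨m, hmK, rfl⟩ := List.mem_map.mp h
        obtain ⟨x0, hx0, hk0⟩ := List.mem_map.mp ((PySem.Set.mem_ofList _ _).mp hmK)
        have hle : (pvCnt nums space m : Int) ≤ C := hk0 ▸ hub x0 hx0
        by_cases hc : (pvCnt nums space m : Int) = C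
        · refine Or.inr ⟨hc, ?_⟩
          refine le_pvSM_of nums space m w hw109 ?_
          intro x hx hkx
          exact hmin x hx (by rw [hkx]; exact hc)
        · exact Or.inl (lt_of_le_of_ne hle hc)

theorem destroyTargets_changed : Claim_changed_destroyTargets := by
  unfold Claim_changed_destroyTargets; decide

theorem destroyTargets_tight : Claim_exact_destroyTargets := by
  intro nums space _ _ hD
  obtain ⟨hnil, hbig⟩ := hD
  obtain ⟨C, w, hB, hwmem, hwcnt, hub, hmin⟩ := B_spec nums space hnil
  rw [hB]
  have hH : ∀ x ∈ nums, (pvCnt nums space (pvKey space x) : Int) = C → 10 ^ 9 + 1 < x := by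
    intro x hx hxc
    refine hbig x hx ?_
    intro y hy
    rw [pvCls_eq, pvCls_eq]
    have h1 := hub y hy
    omega
  have hwbig : 10 ^ 9 + 1 < w := hH w hwmem hwcnt
  have hSM : ∀ m ∈ nums.map (pvKey space), (pvCnt nums space m : Int) = C →
      pvSM nums space m = 10 ^ 9 + 1 := by
    intro m _ hc
    refine le_antisymm (foldl_min_le_init _ _) ?_
    refine le_pvSM_of nums space m _ le_rfl ?_
    intro x hx hkx
    exact le_of_lt (hH x hx (by rw [hkx]; exact hc))
  have hCpos : (0 : Int) < C := by
    have := pvCnt_pos nums space hwmem; omega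
  have hA : destroyTargets nums space = 10 ^ 9 + 1 := by
    refine A_eq_of_dominant nums space ((10 ^ 9 + 1 : Int), C) ?_ ?_
    · refine List.mem_map.mpr ⟨pvKey space w,
        (PySem.Set.mem_ofList _ _).mpr (List.mem_map_of_mem hwmem), ?_⟩
      unfold pvVal
      rw [hSM _ (List.mem_map_of_mem hwmem) hwcnt, hwcnt]
    · intro p hp
      rcases List.mem_cons.mp hp with h | h
      · subst h; exact Or.inl hCpos
      · obtain ⟨m, hmK, rfl⟩ := List.mem_map.mp h
        obtain ⟨x0, hx0, hk0⟩ := List.mem_map.mp ((PySem.Set.mem_ofList _ _).mp hmK)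
        have hle : (pvCnt nums space m : Int) ≤ C := hk0 ▸ hub x0 hx0
        by_cases hc : (pvCnt nums space m : Int) = C
        · exact Or.inr ⟨hc, le_of_eq (hSM _ ((PySem.Set.mem_ofList _ _).mp hmK) hc).symm⟩
        · exact Or.inl (lt_of_le_of_ne hle hc)
  rw [hA]
  omega
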